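-- pv_equiv track=rewrite | github.com/TorSalve/paperseek | src/paperseek/utils/normalization.py | clean_doi
-- ===== SOURCE A (Python) =====
-- from typing import Any, Dict, List, Optional
--
-- def clean_doi(doi: Optional[str]) -> Optional[str]:
--     """
--     Clean and normalize DOI.
--
--     Removes common prefixes like "doi:", "DOI:", "https://doi.org/", etc.
--
--     Args:
--         doi: Raw DOI string
--
--     Returns:
--         Cleaned DOI or None
--     """
--     if not doi:
--         return None
--
--     doi = doi.strip()
--
--     # Remove common prefixes
--     prefixes = [
--         "doi:",
--         "DOI:",
--         "https://doi.org/",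
--         "http://doi.org/",
--         "https://dx.doi.org/",
--         "http://dx.doi.org/",
--     ]
--
--     for prefix in prefixes:
--         if doi.lower().startswith(prefix.lower()):
--             doi = doi[len(prefix) :]
--             break
--
--     return doi.strip() if doi else None
-- ===== SOURCE B (Python) =====
-- def clean_doi(doi):
--     """Clean and normalize DOI by peeling URL/label components instead of scanning a prefix list."""
--     if not doi:
--         return None
--     s = doi.strip()
--     low = s.lower()
--     n = 0
--     if low.startswith("doi:"):
--         n = 4
--     else:
--         m = 8 if low.startswith("https://") else 7 if low.startswith("http://") else -1
--         if m >= 0: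
--             rest = low[m:]
--             if rest.startswith("dx."):
--                 m, rest = m + 3, rest[3:]
--             if rest.startswith("doi.org/"):
--                 n = m + 8
--     s = s[n:]
--     return s.strip() if s else None
-- ===== Notes on version B (the rewrite author's own statement) =====
-- stated objective: alternative
-- what changed: Replaces A's loop over a six-element lowered-prefix list with a single component-peeling pass (DOI label, URL scheme, optional mirror-host part, resolver path) that computes one cut position.
import Mathlib
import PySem

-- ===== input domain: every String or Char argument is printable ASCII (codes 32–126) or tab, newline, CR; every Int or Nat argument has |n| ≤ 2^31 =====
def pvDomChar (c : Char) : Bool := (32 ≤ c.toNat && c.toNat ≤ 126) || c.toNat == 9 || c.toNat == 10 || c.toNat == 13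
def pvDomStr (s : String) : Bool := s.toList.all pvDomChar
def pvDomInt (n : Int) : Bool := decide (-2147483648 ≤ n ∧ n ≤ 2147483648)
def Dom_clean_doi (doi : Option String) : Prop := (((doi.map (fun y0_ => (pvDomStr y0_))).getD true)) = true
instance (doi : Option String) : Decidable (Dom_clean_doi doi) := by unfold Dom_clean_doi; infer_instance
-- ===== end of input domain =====

-- B replaces A's loop over a six-element prefix list by peeling URL components
-- (scheme, optional "dx.", "doi.org/") or the "doi:" label once; objective: alternative/idiomatic, same cost.

-- ===== PORT A =====
def pvPrefixes : List String :=
  ["doi:", "DOI:", "https://doi.org/", "http://doi.org/", "https://dx.doi.org/", "http://dx.doi.org/"]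

-- the 'for prefix in prefixes: … break' loop of A
def pvCleanLoop (d : String) : List String → String
  | [] => d
  | p :: ps =>
    if PySem.Str.startswith (PySem.Str.lower d) (PySem.Str.lower p) then
      PySem.Str.slice d (some (PySem.Str.len p)) none
    else pvCleanLoop d ps

def clean_doi (doi : Option String) : Option String :=
  match doi with
  | none => none
  | some d0 =>
    if d0 = "" then none
    else
      let d := PySem.Str.strip d0
      let d := pvCleanLoop d pvPrefixes
      if d = "" then none else some (PySem.Str.strip d)

-- ===== PORT B =====
-- B's computation of the number of leading characters to remove
def pvAltN (low : String) : Int :=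
  if PySem.Str.startswith low "doi:" then 4
  else
    let m : Int :=
      if PySem.Str.startswith low "https://" then 8
      else if PySem.Str.startswith low "http://" then 7
      else -1
    if 0 ≤ m then
      let rest := PySem.Str.slice low (some m) none
      let mr :=
        if PySem.Str.startswith rest "dx." then (m + 3, PySem.Str.slice rest (some 3) none)
        else (m, rest)
      if PySem.Str.startswith mr.2 "doi.org/" then mr.1 + 8 else 0
    else 0

def clean_doi_alt (doi : Option String) : Option String :=
  match doi with
  | none => none
  | some d0 =>
    if d0 = "" then none
    else
      let s := PySem.Str.strip d0
      let s2 := PySem.Str.slice s (some (pvAltN (PySem.Str.lower s))) none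
      if s2 = "" then none else some (PySem.Str.strip s2)

-- ===== PRECONDITION & SPEC =====
def Spec_clean_doi (doi : Option String) (out : Option String) : Prop := out = clean_doi_alt doi
instance (doi : Option String) (out : Option String) : Decidable (Spec_clean_doi doi out) := by unfold Spec_clean_doi; infer_instance

-- ===== CLAIM (what is proved, stated in full; the proofs are below) =====
def Claim_equal_clean_doi : Prop := ∀ (doi : Option String), Dom_clean_doi doi → Spec_clean_doi doi (clean_doi doi)

-- ===== LEMMAS AND PROOFS =====

theorem pv_pref_getElem? {l m : List Char} (h : l <+: m) (i : Nat) (hi : i < l.length) :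
    m[i]? = l[i]? := by
  rcases h with ⟨t, rfl⟩
  rw [List.getElem?_append_left hi]

theorem pv_prefix_append_iff {a b l : List Char} :
    (a ++ b) <+: l ↔ a <+: l ∧ b <+: l.drop a.length := by
  constructor
  · rintro ⟨t, rfl⟩
    refine ⟨⟨b ++ t, by simp⟩, ?_⟩
    rw [List.append_assoc, List.drop_left]
    exact ⟨t, rfl⟩
  · rintro ⟨⟨t, rfl⟩, hb⟩
    rw [List.drop_left] at hb
    rcases hb with ⟨u, rfl⟩
    exact ⟨u, by simp⟩

-- a concatenated prefix pattern splits into two prefix checks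
theorem pv_prefix_split (l p q pq : List Char) (n : Nat) (hpq : pq = p ++ q) (hn : p.length = n) :
    (pq <+: l) ↔ (p <+: l ∧ q <+: PySem.List.slice l (some (n : Int)) none) := by
  subst hpq hn
  rw [PySem.List.slice_from_natCast]
  exact pv_prefix_append_iff

-- two patterns that disagree at index i cannot both be prefixes
theorem pv_prefix_disj (l p q : List Char) (i : Nat) (hip : i < p.length) (hiq : i < q.length)
    (hne : p[i]? ≠ q[i]?) (hp : p <+: l) : ¬ (q <+: l) := by
  intro hq
  exact hne ((pv_pref_getElem? hp i hip).symm.trans (pv_pref_getElem? hq i hiq))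

theorem pv_slice_zero (s : String) : PySem.Str.slice s (some 0) none = s := by
  simp [PySem.Str.slice]

theorem pv_loop_eq (s : String) :
    pvCleanLoop s pvPrefixes =
      PySem.Str.slice s (some (pvAltN (PySem.Str.lower s))) none := by
  set low := PySem.Str.lower s with hlow
  have l1 : PySem.Str.lower "doi:" = "doi:" := by decide
  have l2 : PySem.Str.lower "DOI:" = "doi:" := by decide
  have l3 : PySem.Str.lower "https://doi.org/" = "https://doi.org/" := by decide
  have l4 : PySem.Str.lower "http://doi.org/" = "http://doi.org/" := by decide
  have l5 : PySem.Str.lower "https://dx.doi.org/" = "https://dx.doi.org/" := by decide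
  have l6 : PySem.Str.lower "http://dx.doi.org/" = "http://dx.doi.org/" := by decide
  simp only [pvCleanLoop, pvPrefixes, l1, l2, l3, l4, l5, l6, ← hlow]
  unfold pvAltN
  simp only [PySem.Str.startswith_eq, PySem.Str.toList_slice, PySem.Chars.slice_eq_listSlice,
    PySem.Chars.startswith_iff]
  simp only [pv_prefix_split low.toList "https://".toList "doi.org/".toList
        "https://doi.org/".toList 8 (by decide) (by decide),
      pv_prefix_split low.toList "http://".toList "doi.org/".toList
        "http://doi.org/".toList 7 (by decide) (by decide),
      pv_prefix_split low.toList "https://".toList "dx.doi.org/".toList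
        "https://dx.doi.org/".toList 8 (by decide) (by decide),
      pv_prefix_split low.toList "http://".toList "dx.doi.org/".toList
        "http://dx.doi.org/".toList 7 (by decide) (by decide)]
  simp only [Nat.cast_ofNat]
  simp only [pv_prefix_split (PySem.List.slice low.toList (some 8) none)
        "dx.".toList "doi.org/".toList "dx.doi.org/".toList 3 (by decide) (by decide),
      pv_prefix_split (PySem.List.slice low.toList (some 7) none)
        "dx.".toList "doi.org/".toList "dx.doi.org/".toList 3 (by decide) (by decide)]
  simp only [Nat.cast_ofNat]
  have e1 : ("doi:".length : Int) = 4 := by decide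
  have e3 : ("https://doi.org/".length : Int) = 16 := by decide
  have e4 : ("http://doi.org/".length : Int) = 15 := by decide
  have e5 : ("https://dx.doi.org/".length : Int) = 19 := by decide
  have e6 : ("http://dx.doi.org/".length : Int) = 18 := by decide
  by_cases h0 : "doi:".toList <+: low.toList
  · norm_num [h0, e1, PySem.Str.len, PySem.Chars.len_eq]
  · by_cases hs : "https://".toList <+: low.toList
    · have hh : ¬ ("http://".toList <+: low.toList) :=
        pv_prefix_disj low.toList _ _ 4 (by decide) (by decide) (by decide) hs
      by_cases hdx : "dx.".toList <+: PySem.List.slice low.toList (some 8) none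
      · have hd8 : ¬ ("doi.org/".toList <+: PySem.List.slice low.toList (some 8) none) :=
          pv_prefix_disj _ _ _ 1 (by decide) (by decide) (by decide) hdx
        by_cases hd11 : "doi.org/".toList <+:
            PySem.List.slice (PySem.List.slice low.toList (some 8) none) (some 3) none
        · norm_num [h0, hs, hh, hdx, hd8, hd11, e5, PySem.Str.len, PySem.Chars.len_eq]
        · norm_num [h0, hs, hh, hdx, hd8, hd11, pv_slice_zero]
      · by_cases hd8 : "doi.org/".toList <+: PySem.List.slice low.toList (some 8) none
        · norm_num [h0, hs, hh, hdx, hd8, e3, PySem.Str.len, PySem.Chars.len_eq]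
        · norm_num [h0, hs, hh, hdx, hd8, pv_slice_zero]
    · by_cases hh : "http://".toList <+: low.toList
      · by_cases hdx : "dx.".toList <+: PySem.List.slice low.toList (some 7) none
        · have hd7 : ¬ ("doi.org/".toList <+: PySem.List.slice low.toList (some 7) none) :=
            pv_prefix_disj _ _ _ 1 (by decide) (by decide) (by decide) hdx
          by_cases hd10 : "doi.org/".toList <+:
              PySem.List.slice (PySem.List.slice low.toList (some 7) none) (some 3) none
          · norm_num [h0, hs, hh, hdx, hd7, hd10, e6, PySem.Str.len, PySem.Chars.len_eq]
          · norm_num [h0, hs, hh, hdx, hd7, hd10, pv_slice_zero]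
        · by_cases hd7 : "doi.org/".toList <+: PySem.List.slice low.toList (some 7) none
          · norm_num [h0, hs, hh, hdx, hd7, e4, PySem.Str.len, PySem.Chars.len_eq]
          · norm_num [h0, hs, hh, hdx, hd7, pv_slice_zero]
      · norm_num [h0, hs, hh, pv_slice_zero]

-- ===== VERDICT (by name: the statement is the Claim_ definition above) =====
theorem clean_doi_spec : Claim_equal_clean_doi := by
  intro doi _
  unfold Spec_clean_doi clean_doi clean_doi_alt
  cases doi with
  | none => rfl
  | some d0 =>
    by_cases h : d0 = "" <;> simp [h, pv_loop_eq]
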